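-- pv_equiv track=rewrite | github.com/Ace1928/eidosian_forge | archive_forge/code/func_valid_glob.py | valid_glob
-- ===== SOURCE A (Python) =====
-- def valid_glob(ipglob):
--     """
--     :param ipglob: An IP address range in a glob-style format.
--
--     :return: ``True`` if IP range glob is valid, ``False`` otherwise.
--     """
--     if not isinstance(ipglob, str):
--         return False
--     seen_hyphen = False
--     seen_asterisk = False
--     octets = ipglob.split('.')
--     if len(octets) != 4:
--         return False
--     for octet in octets:
--         if '-' in octet:
--             if seen_hyphen:
--                 return False
--             seen_hyphen = True
--             if seen_asterisk:
--                 return False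
--             try:
--                 octet1, octet2 = [int(i) for i in octet.split('-')]
--             except ValueError:
--                 return False
--             if octet1 >= octet2:
--                 return False
--             if not 0 <= octet1 <= 254:
--                 return False
--             if not 1 <= octet2 <= 255:
--                 return False
--         elif octet == '*':
--             seen_asterisk = True
--         else:
--             if seen_hyphen is True:
--                 return False
--             if seen_asterisk is True:
--                 return False
--             try:
--                 if not 0 <= int(octet) <= 255:
--                     return False
--             except ValueError:
--                 return False
--     return True
-- ===== SOURCE B (Python) =====
-- def _classify_octet(octet):
--     if octet == '*':
--         return 'star'
--     if '-' in octet: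
--         parts = octet.split('-')
--         if len(parts) != 2:
--             return None
--         try:
--             o1, o2 = int(parts[0]), int(parts[1])
--         except ValueError:
--             return None
--         if o1 < o2 and 0 <= o1 <= 254 and 1 <= o2 <= 255:
--             return 'range'
--         return None
--     try:
--         v = int(octet)
--     except ValueError:
--         return None
--     return 'plain' if 0 <= v <= 255 else None
--
--
-- def valid_glob(ipglob):
--     if not isinstance(ipglob, str):
--         return False
--     octets = ipglob.split('.')
--     if len(octets) != 4:
--         return False
--     kinds = []
--     for octet in octets:
--         k = _classify_octet(octet)
--         if k is None:
--             return False
--         kinds.append(k)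
--     seen_range = False
--     seen_star = False
--     for k in kinds:
--         if k == 'star':
--             seen_star = True
--         elif seen_range or seen_star:
--             return False
--         elif k == 'range':
--             seen_range = True
--     return True
-- ===== Notes on version B (the rewrite author's own statement) =====
-- stated objective: alternative
-- what changed: B replaces A's single interleaved loop with mutable flags by a two-phase decomposition: first classify each octet into a kind (star/range/plain, None on parse or bound failure), then a separate ordering pass over the kind list enforces the star/range/plain sequencing rules.
import Mathlib
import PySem

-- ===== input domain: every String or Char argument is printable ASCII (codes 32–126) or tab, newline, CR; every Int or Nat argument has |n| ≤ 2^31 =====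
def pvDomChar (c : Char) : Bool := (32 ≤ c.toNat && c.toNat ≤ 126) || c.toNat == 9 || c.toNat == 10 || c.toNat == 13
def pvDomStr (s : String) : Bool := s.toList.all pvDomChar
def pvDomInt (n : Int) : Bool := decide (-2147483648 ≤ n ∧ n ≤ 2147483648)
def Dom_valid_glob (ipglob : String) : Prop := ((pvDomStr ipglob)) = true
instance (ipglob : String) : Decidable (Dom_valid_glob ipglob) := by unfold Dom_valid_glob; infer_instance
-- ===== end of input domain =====

-- B re-implements A by a two-phase decomposition (classify octets into kinds, then check ordering); objective: alternative structure, same cost.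

-- ===== PORT A =====
-- s.split(sep) for a nonempty separator (both ports use it)
def pySplit (s sep : String) : List String := (PySem.Str.split? s sep).getD []

-- A's single loop over the octets carrying the seen_hyphen / seen_asterisk flags
def validGlobLoopA : List String → Bool → Bool → Bool
  | [], _, _ => true
  | octet :: rest, seenHyphen, seenAsterisk =>
    if PySem.Str.isIn "-" octet then
      if seenHyphen then false
      else if seenAsterisk then false
      else
        -- [int(i) for i in octet.split('-')] then unpacking into exactly two
        match (pySplit octet "-").mapM PySem.Int.ofStr? with
        | some [octet1, octet2] =>
          if octet1 ≥ octet2 then false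
          else if ¬ (0 ≤ octet1 ∧ octet1 ≤ 254) then false
          else if ¬ (1 ≤ octet2 ∧ octet2 ≤ 255) then false
          else validGlobLoopA rest true seenAsterisk
        | _ => false
    else if octet = "*" then validGlobLoopA rest seenHyphen true
    else
      if seenHyphen then false
      else if seenAsterisk then false
      else
        match PySem.Int.ofStr? octet with
        | some v => if ¬ (0 ≤ v ∧ v ≤ 255) then false else validGlobLoopA rest seenHyphen seenAsterisk
        | none => false

def valid_glob (ipglob : String) : Bool :=
  let octets := pySplit ipglob "."
  if octets.length ≠ 4 then false
  else validGlobLoopA octets false false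

-- ===== PORT B =====
inductive OctetKind | star | range | plain
deriving DecidableEq, Repr

def classifyOctet (octet : String) : Option OctetKind :=
  if octet = "*" then some .star
  else if PySem.Str.isIn "-" octet then
    match pySplit octet "-" with
    | [p1, p2] =>
      match PySem.Int.ofStr? p1, PySem.Int.ofStr? p2 with
      | some o1, some o2 =>
        if o1 < o2 ∧ (0 ≤ o1 ∧ o1 ≤ 254) ∧ (1 ≤ o2 ∧ o2 ≤ 255) then some .range else none
      | _, _ => none
    | _ => none
  else
    match PySem.Int.ofStr? octet with
    | some v => if 0 ≤ v ∧ v ≤ 255 then some .plain else none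
    | none => none

def kindOrderOk : List OctetKind → Bool → Bool → Bool
  | [], _, _ => true
  | k :: rest, seenRange, seenStar =>
    if k = .star then kindOrderOk rest seenRange true
    else if seenRange || seenStar then false
    else if k = .range then kindOrderOk rest true seenStar
    else kindOrderOk rest seenRange seenStar

def valid_glob_alt (ipglob : String) : Bool :=
  let octets := pySplit ipglob "."
  if octets.length ≠ 4 then false
  else
    match octets.mapM classifyOctet with
    | none => false
    | some kinds => kindOrderOk kinds false false

-- ===== PRECONDITION & SPEC =====
def Spec_valid_glob (ipglob : String) (out : Bool) : Prop := out = valid_glob_alt ipglob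
instance (ipglob : String) (out : Bool) : Decidable (Spec_valid_glob ipglob out) := by unfold Spec_valid_glob; infer_instance

-- ===== CLAIM (what is proved, stated in full; the proofs are below) =====
def Claim_equal_valid_glob : Prop := ∀ (ipglob : String), Dom_valid_glob ipglob → Spec_valid_glob ipglob (valid_glob ipglob)

-- ===== LEMMAS AND PROOFS =====

-- "-" does not occur in "*"
theorem isIn_hyphen_star : PySem.Str.isIn "-" "*" = false := by decide

-- per-octet step lemmas relating A's loop body to the octet's classification
theorem stepA_none (octet : String) (rest : List String)
    (hc : classifyOctet octet = none) (sh ss : Bool) :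
    validGlobLoopA (octet :: rest) sh ss = false := by
  by_cases hstar : octet = "*"
  · rw [classifyOctet, if_pos hstar] at hc; exact absurd hc (by decide)
  · rw [classifyOctet, if_neg hstar] at hc
    by_cases hhy : PySem.Str.isIn "-" octet = true
    · rw [if_pos hhy] at hc
      rw [validGlobLoopA, if_pos hhy]
      cases sh with
      | true => rfl
      | false =>
        cases ss with
        | true => rfl
        | false =>
          simp only [Bool.false_eq_true, if_false]
          match hsplit : pySplit octet "-" with
          | [] => rfl
          | [p1] =>
            cases h1 : PySem.Int.ofStr? p1 <;> simp [List.mapM_cons, h1]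
          | [p1, p2] =>
            rw [hsplit] at hc
            cases h1 : PySem.Int.ofStr? p1 <;> cases h2 : PySem.Int.ofStr? p2
            · simp [List.mapM_cons, h1, h2]
            · simp [List.mapM_cons, h1, h2]
            · simp [List.mapM_cons, h1, h2]
            · rename_i o1 o2
              simp only [h1, h2] at hc
              have hm : List.mapM PySem.Int.ofStr? [p1, p2] = some [o1, o2] := by
                simp [List.mapM_cons, h1, h2]
              simp only [hm]
              split at hc
              · exact absurd hc (by decide)
              · rename_i hcond
                split_ifs with a b c <;> first | rfl | (exfalso; exact hcond ⟨by omega, ⟨by omega, by omega⟩, by omega, by omega⟩)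
          | p1 :: p2 :: p3 :: ps =>
            cases h1 : PySem.Int.ofStr? p1 <;> cases h2 : PySem.Int.ofStr? p2 <;>
              cases h3 : PySem.Int.ofStr? p3 <;>
              cases h4 : ps.mapM PySem.Int.ofStr? <;>
              simp [List.mapM_cons, h1, h2, h3, h4]
    · have hhy' : PySem.Str.isIn "-" octet = false := by
        cases h : PySem.Str.isIn "-" octet
        · rfl
        · exact absurd h hhy
      rw [if_neg hhy] at hc
      rw [validGlobLoopA, hhy']
      cases sh with
      | true => simp [hstar]
      | false =>
        cases ss with
        | true => simp [hstar]
        | false =>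
          simp only [Bool.false_eq_true, if_false, if_neg hstar]
          cases hv : PySem.Int.ofStr? octet with
          | none => rfl
          | some v =>
            simp only [hv] at hc
            split at hc
            · exact absurd hc (by decide)
            · rename_i hb
              simp [hb]

theorem stepA_star (octet : String) (rest : List String)
    (hc : classifyOctet octet = some .star) (sh ss : Bool) :
    validGlobLoopA (octet :: rest) sh ss = validGlobLoopA rest sh true := by
  have hstar : octet = "*" := by
    by_contra hstar
    rw [classifyOctet, if_neg hstar] at hc
    by_cases hhy : PySem.Str.isIn "-" octet = true
    · rw [if_pos hhy] at hc
      match hsplit : pySplit octet "-" with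
      | [] => rw [hsplit] at hc; simp at hc
      | [p1] => rw [hsplit] at hc; simp at hc
      | [p1, p2] =>
        rw [hsplit] at hc
        cases h1 : PySem.Int.ofStr? p1 <;> cases h2 : PySem.Int.ofStr? p2 <;>
          simp only [h1, h2] at hc
        · exact absurd hc (by decide)
        · exact absurd hc (by decide)
        · exact absurd hc (by decide)
        · split at hc
          · exact absurd hc (by decide)
          · exact absurd hc (by decide)
      | p1 :: p2 :: p3 :: ps => rw [hsplit] at hc; simp at hc
    · rw [if_neg hhy] at hc
      cases hv : PySem.Int.ofStr? octet with
      | none => simp only [hv] at hc; exact absurd hc (by decide)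
      | some v =>
        simp only [hv] at hc
        split at hc
        · exact absurd hc (by decide)
        · exact absurd hc (by decide)
  subst hstar
  rw [validGlobLoopA, isIn_hyphen_star]
  simp

theorem stepA_range (octet : String) (rest : List String)
    (hc : classifyOctet octet = some .range) (sh ss : Bool) :
    validGlobLoopA (octet :: rest) sh ss =
      (if sh || ss then false else validGlobLoopA rest true ss) := by
  have hstar : octet ≠ "*" := by
    intro h; rw [classifyOctet, if_pos h] at hc; exact absurd hc (by decide)
  rw [classifyOctet, if_neg hstar] at hc
  by_cases hhy : PySem.Str.isIn "-" octet = true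
  · rw [if_pos hhy] at hc
    rw [validGlobLoopA, if_pos hhy]
    cases sh with
    | true => rfl
    | false =>
      cases ss with
      | true => rfl
      | false =>
        simp only [Bool.false_eq_true, if_false, Bool.or_self]
        match hsplit : pySplit octet "-" with
        | [] => rw [hsplit] at hc; simp at hc
        | [p1] =>
          rw [hsplit] at hc
          simp at hc
        | [p1, p2] =>
          rw [hsplit] at hc
          cases h1 : PySem.Int.ofStr? p1 <;> cases h2 : PySem.Int.ofStr? p2 <;>
            simp only [h1, h2] at hc
        

          · exact absurd hc (by decide)
          · exact absurd hc (by decide)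
          · exact absurd hc (by decide)
          · rename_i o1 o2
            split at hc
            · rename_i hcond
              have hm : List.mapM PySem.Int.ofStr? [p1, p2] = some [o1, o2] := by
                simp [List.mapM_cons, h1, h2]
              simp only [hm]
              rw [if_neg (by omega : ¬ o1 ≥ o2),
                  if_neg (by push Not; omega : ¬ ¬ (0 ≤ o1 ∧ o1 ≤ 254)),
                  if_neg (by push Not; omega : ¬ ¬ (1 ≤ o2 ∧ o2 ≤ 255))]
            · exact absurd hc (by decide)
        | p1 :: p2 :: p3 :: ps => rw [hsplit] at hc; simp at hc
  · rw [if_neg hhy] at hc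
    exfalso
    cases hv : PySem.Int.ofStr? octet with
    | none => simp only [hv] at hc; exact absurd hc (by decide)
    | some v =>
      simp only [hv] at hc
      split at hc
      · exact absurd hc (by decide)
      · exact absurd hc (by decide)

theorem stepA_plain (octet : String) (rest : List String)
    (hc : classifyOctet octet = some .plain) (sh ss : Bool) :
    validGlobLoopA (octet :: rest) sh ss =
      (if sh || ss then false else validGlobLoopA rest sh ss) := by
  have hstar : octet ≠ "*" := by
    intro h; rw [classifyOctet, if_pos h] at hc; exact absurd hc (by decide)
  rw [classifyOctet, if_neg hstar] at hc
  by_cases hhy : PySem.Str.isIn "-" octet = true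
  · exfalso
    rw [if_pos hhy] at hc
    match hsplit : pySplit octet "-" with
    | [] => rw [hsplit] at hc; simp at hc
    | [p1] => rw [hsplit] at hc; simp at hc
    | [p1, p2] =>
      rw [hsplit] at hc
      cases h1 : PySem.Int.ofStr? p1 <;> cases h2 : PySem.Int.ofStr? p2 <;>
        simp only [h1, h2] at hc
      · exact absurd hc (by decide)
      · exact absurd hc (by decide)
      · exact absurd hc (by decide)
      · split at hc
        · exact absurd hc (by decide)
        · exact absurd hc (by decide)
    | p1 :: p2 :: p3 :: ps => rw [hsplit] at hc; simp at hc
  · have hhy' : PySem.Str.isIn "-" octet = false := by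
      cases h : PySem.Str.isIn "-" octet
      · rfl
      · exact absurd h hhy
    rw [if_neg hhy] at hc
    rw [validGlobLoopA, hhy']
    cases hv : PySem.Int.ofStr? octet with
    | none => simp only [hv] at hc; exact absurd hc (by decide)
    | some v =>
      simp only [hv] at hc
      split at hc
      · rename_i hb
        cases sh <;> cases ss <;> simp [hstar, hb]
      · exact absurd hc (by decide)

-- A's loop equals: classify everything, then run the ordering pass (flags aligned)
theorem loopA_eq_classify (octets : List String) :
    ∀ sh ss : Bool,
      validGlobLoopA octets sh ss =
        (match octets.mapM classifyOctet with
         | none => false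
         | some ks => kindOrderOk ks sh ss) := by
  induction octets with
  | nil => intro sh ss; rfl
  | cons octet rest ih =>
    intro sh ss
    cases hc : classifyOctet octet with
    | none =>
      rw [stepA_none octet rest hc]
      simp [List.mapM_cons, hc]
    | some k =>
      cases k with
      | star =>
        rw [stepA_star octet rest hc, ih]
        simp only [List.mapM_cons, hc, Option.bind_some]
        cases rest.mapM classifyOctet <;> simp [kindOrderOk]
      | range =>
        rw [stepA_range octet rest hc]
        simp only [List.mapM_cons, hc, Option.bind_some]
        cases hr : rest.mapM classifyOctet with
        | none => rw [ih, hr]; cases sh <;> cases ss <;> simp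
        | some ks => rw [ih, hr]; cases sh <;> cases ss <;> simp [kindOrderOk]
      | plain =>
        rw [stepA_plain octet rest hc]
        simp only [List.mapM_cons, hc, Option.bind_some]
        cases hr : rest.mapM classifyOctet with
        | none => rw [ih, hr]; cases sh <;> cases ss <;> simp
        | some ks => rw [ih, hr]; cases sh <;> cases ss <;> simp [kindOrderOk]

-- ===== VERDICT (by name: the statement is the Claim_ definition above) =====
theorem valid_glob_spec : Claim_equal_valid_glob := by
  intro ipglob _
  unfold Spec_valid_glob valid_glob valid_glob_alt
  simp only [loopA_eq_classify]
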